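-- pv_equiv track=rewrite | github.com/tvheadend/tvheadend | support/poc.py | po_str
-- ===== SOURCE A (Python) =====
-- def po_str(text):
--   text = text.lstrip().rstrip()
--   if not text:
--     return ''
--   if text[0] != '"' and text[-1] != '"':
--     raise ValueError('Wrong text: %s' % text)
--   text = text[1:-1]
--   if not text:
--     return ''
--   r = ''
--   l = len(text)
--   i = 0
--   while i < l:
--     c = text[i]
--     if c == '\\':
--       i += 1
--       if i >= l:
--         continue
--       c = text[i]
--       if c == 'n':
--         c = '\n'
--       elif c == 'r':
--         c = '\r'
--       elif c == 't':
--         c = '\t'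
--     r += c
--     i += 1
--   return r
-- ===== SOURCE B (Python) =====
-- import re
--
-- _ESC = {'n': '\n', 'r': '\r', 't': '\t'}
--
-- def po_str(text):
--   text = text.strip()
--   if not text:
--     return ''
--   if text[0] != '"' and text[-1] != '"':
--     raise ValueError('Wrong text: %s' % text)
--   return re.sub(r'\\(.?)', lambda m: _ESC.get(m.group(1), m.group(1)), text[1:-1])
-- ===== Notes on version B (the rewrite author's own statement) =====
-- stated objective: idiomatic
-- what changed: The manual index-driven while loop with a character accumulator is replaced by a single declarative regex substitution re.sub(r'\\(.?)', ...) whose replacement maps the captured character through an escape table; the redundant second emptiness check also disappears.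
-- outside the precondition, e.g. on po_str('abc'): A raises ValueError, B raises ValueError
import Mathlib
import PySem

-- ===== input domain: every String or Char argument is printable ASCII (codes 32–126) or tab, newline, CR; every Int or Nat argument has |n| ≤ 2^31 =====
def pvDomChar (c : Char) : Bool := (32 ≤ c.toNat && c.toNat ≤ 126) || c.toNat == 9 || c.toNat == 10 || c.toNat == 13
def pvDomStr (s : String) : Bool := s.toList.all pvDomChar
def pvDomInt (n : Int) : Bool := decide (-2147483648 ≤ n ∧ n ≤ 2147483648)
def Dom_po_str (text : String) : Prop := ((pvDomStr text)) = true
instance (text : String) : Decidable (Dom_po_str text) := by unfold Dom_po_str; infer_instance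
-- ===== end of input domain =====

-- B replaces A's index-driven while loop by a declarative regex-style pattern scan (re.sub of '\\(.?)'); objective: idiomatic.

-- ===== PORT A =====
-- the while loop of A: index i over the characters, accumulator r
def po_strLoop (cs : List Char) (i : Int) (r : List Char) : List Char :=
  if i < (cs.length : Int) then
    match PySem.List.pyGet? cs i with
    | none => r
    | some c =>
      if c = '\\' then
        if (cs.length : Int) ≤ i + 1 then r          -- 'continue' with i ≥ l: loop exits
        else
          match PySem.List.pyGet? cs (i + 1) with
          | none => r
          | some c2 =>
            let c3 := if c2 = 'n' then '\n' else if c2 = 'r' then '\r'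
                      else if c2 = 't' then '\t' else c2
            po_strLoop cs (i + 2) (r ++ [c3])
      else po_strLoop cs (i + 1) (r ++ [c])
  else r
termination_by ((cs.length : Int) - i).toNat
decreasing_by all_goals simp_all

def po_str (text : String) : String :=
  let t := PySem.Chars.rstrip (PySem.Chars.lstrip text.toList)
  if t = [] then ""
  else if PySem.List.pyGet? t 0 ≠ some '"' ∧ PySem.List.pyGet? t (-1) ≠ some '"' then
    ""   -- Python raises ValueError here; excluded by Pre_po_str
  else
    let t2 := PySem.List.slice t (some 1) (some (-1))
    if t2 = [] then "" else String.ofList (po_strLoop t2 0 [])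

-- ===== PORT B =====
def poEsc : PySem.Dict Char Char := PySem.Dict.ofList [('n', '\n'), ('r', '\r'), ('t', '\t')]

-- hand port of re.sub(r'\\(.?)', lambda m: _ESC.get(m.group(1), m.group(1)), cs):
-- exact for this pattern — a greedy left-to-right non-overlapping scan; a match is a
-- backslash plus (optionally, if the string does not end) the next character.
def poSub (cs : List Char) : List Char :=
  match cs with
  | [] => []
  | '\\' :: [] => []                                 -- empty group: replacement is ''
  | '\\' :: c :: rest => PySem.Dict.getD poEsc c c :: poSub rest
  | c :: rest => c :: poSub rest

def po_str_alt (text : String) : String :=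
  let t := PySem.Chars.strip text.toList
  if t = [] then ""
  else if PySem.List.pyGet? t 0 ≠ some '"' ∧ PySem.List.pyGet? t (-1) ≠ some '"' then
    ""   -- Python raises ValueError here; excluded by Pre_po_str
  else String.ofList (poSub (PySem.List.slice t (some 1) (some (-1))))

-- ===== PRECONDITION & SPEC =====
-- Pre_ excludes exactly the inputs on which A raises ValueError: a nonempty stripped
-- string with neither a leading nor a trailing double quote.
def Pre_po_str (text : String) : Prop :=
  PySem.Chars.strip text.toList = [] ∨
  PySem.List.pyGet? (PySem.Chars.strip text.toList) 0 = some '"' ∨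
  PySem.List.pyGet? (PySem.Chars.strip text.toList) (-1) = some '"'
instance (text : String) : Decidable (Pre_po_str text) := by unfold Pre_po_str; infer_instance

def pvWitness_po_str : String := "\"a\\n\""

def Spec_po_str (text : String) (out : String) : Prop := out = po_str_alt text
instance (text : String) (out : String) : Decidable (Spec_po_str text out) := by unfold Spec_po_str; infer_instance

-- ===== CLAIM (what is proved, stated in full; the proofs are below) =====
def Claim_equal_po_str : Prop := ∀ (text : String), Dom_po_str text → Pre_po_str text → Spec_po_str text (po_str text)

-- ===== LEMMAS AND PROOFS =====

lemma poSub_nil : poSub [] = [] := rfl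

-- A's loop, started at index i, produces r followed by the regex scan of the suffix.
lemma poSub_bs_cons (c : Char) (rest : List Char) :
    poSub ('\\' :: c :: rest) = PySem.Dict.getD poEsc c c :: poSub rest := rfl

lemma poSub_cons_ne (c : Char) (rest : List Char) (h : c ≠ '\\') :
    poSub (c :: rest) = c :: poSub rest := by
  cases rest <;> simp [poSub, h]

lemma poEsc_getD (c : Char) :
    PySem.Dict.getD poEsc c c =
      (if c = 'n' then '\n' else if c = 'r' then '\r' else if c = 't' then '\t' else c) := by
  by_cases h1 : c = 'n'
  · subst h1; decide
  by_cases h2 : c = 'r'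
  · subst h2; decide
  by_cases h3 : c = 't'
  · subst h3; decide
  have e : poEsc = PySem.Dict.mk [('n', '\n'), ('r', '\x0d'), ('t', '\t')] := by decide
  simp [e, PySem.Dict.getD, PySem.Dict.get?, beq_iff_eq,
    Ne.symm h1, Ne.symm h2, Ne.symm h3, h1, h2, h3]

lemma po_strLoop_eq (cs : List Char) :
    ∀ n i r, cs.length - i = n →
      po_strLoop cs (i : Int) r = r ++ poSub (cs.drop i) := by
  intro n
  induction n using Nat.strong_induction_on with
  | _ n ih =>
    intro i r hn
    rw [po_strLoop]
    by_cases hi : i < cs.length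
    · have hlt : (i : Int) < (cs.length : Int) := by exact_mod_cast hi
      simp only [hlt, if_true]
      have hget : PySem.List.pyGet? cs (i : Int) = some cs[i] := by
        simp [List.getElem?_eq_getElem hi]
      have hdrop : cs.drop i = cs[i] :: cs.drop (i + 1) :=
        (List.getElem_cons_drop hi).symm
      rw [hget]
      by_cases hc : cs[i] = '\\'
      · simp only [hc, if_true]
        by_cases h2 : cs.length ≤ i + 1
        · have hi1 : i + 1 = cs.length := by omega
          have hnil : cs.drop (i + 1) = [] := by simp [hi1]
          have hle : (cs.length : Int) ≤ (i : Int) + 1 := by exact_mod_cast Nat.le_of_eq hi1.symm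
          simp [hle, hdrop, hnil, poSub, hc]
        · have hi1 : i + 1 < cs.length := by omega
          have hlt1 : ¬ ((cs.length : Int) ≤ (i : Int) + 1) := by
            rw [not_le]; exact_mod_cast Nat.lt_of_lt_of_le hi1 (Nat.le_refl _)
          simp only [hlt1, if_false]
          have hget1 : PySem.List.pyGet? cs ((i : Int) + 1) = some cs[i + 1] := by
            have h0 : (0 : Int) ≤ (i : Int) + 1 := by positivity
            have hl : ((i : Int) + 1) < (cs.length : Int) := by exact_mod_cast hi1
            have hv := PySem.List.pyGet?_eq_some_getElem cs h0 hl
            have ht : ((i : Int) + 1).toNat = i + 1 := by omega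
            simp only [ht] at hv
            exact hv
          rw [hget1]
          dsimp only
          have hcast : ((i : Int) + 2) = ((i + 2 : Nat) : Int) := by push_cast; ring
          rw [hcast, ih (cs.length - (i + 2)) (by omega) (i + 2) _ rfl]
          have hdrop1 : cs.drop (i + 1) = cs[i + 1] :: cs.drop (i + 2) := by
            exact (List.getElem_cons_drop hi1).symm
          rw [hdrop, hdrop1, hc, poSub_bs_cons, poEsc_getD]
          simp
      · simp only [hc, if_false]
        have hcast : ((i : Int) + 1) = ((i + 1 : Nat) : Int) := by push_cast; ring
        rw [hcast, ih (cs.length - (i + 1)) (by omega) (i + 1) _ rfl]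
        rw [hdrop, poSub_cons_ne _ _ hc]
        simp
    · have hge : ¬ ((i : Int) < (cs.length : Int)) := by exact_mod_cast hi
      simp [hge, List.drop_eq_nil_of_le (by omega : cs.length ≤ i), poSub]

lemma po_strLoop_zero (cs : List Char) : po_strLoop cs 0 [] = poSub cs := by
  have := po_strLoop_eq cs (cs.length - 0) 0 [] rfl
  simpa using this

-- ===== VERDICT (by name: the statement is the Claim_ definition above) =====
theorem po_str_spec : Claim_equal_po_str := by
  intro text _ _
  unfold Spec_po_str po_str po_str_alt
  have hs : PySem.Chars.strip text.toList
      = PySem.Chars.rstrip (PySem.Chars.lstrip text.toList) := rfl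
  simp only [← hs]
  split
  · rfl
  · split
    · rfl
    · split
      · rename_i h2
        rw [h2, poSub_nil]
      · rw [po_strLoop_zero]
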